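-- pv_equiv track=rewrite | github.com/draidev/Python_algorithm | Baekjoon/그래프/2606_바이러스_dfs.py | count_infected_computers
-- ===== SOURCE A (Python) =====
-- def count_infected_computers(num_computers, connections):
--     graph = {i: set() for i in range(1, num_computers + 1)}
--
--     for computer_a, computer_b in connections:
--         graph[computer_a].add(computer_b)
--         graph[computer_b].add(computer_a)
--
--     infected_computers = set()
--     stack = [1]
--
--     while stack:
--         current_computer = stack.pop()
--
--         if current_computer not in infected_computers:
--             infected_computers.add(current_computer)
--             stack.extend(graph[current_computer] - infected_computers)
--
--     return len(infected_computers) - 1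
-- ===== SOURCE B (Python) =====
-- def count_infected_computers(num_computers, connections):
--     # Union-find (smaller-root-wins union) instead of DFS; same return value.
--     parent = list(range(num_computers + 1))
--
--     def find(x):
--         while parent[x] != x:
--             x = parent[x]
--         return x
--
--     for a, b in connections:
--         ra, rb = find(a), find(b)
--         if ra < rb:
--             parent[rb] = ra
--         elif rb < ra:
--             parent[ra] = rb
--
--     root = find(1)
--     roots = [0] * (num_computers + 1)
--     count = 0
--     for i in range(1, num_computers + 1):
--         roots[i] = i if parent[i] == i else roots[parent[i]]
--         if roots[i] == root:
--             count += 1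
--     return count - 1
-- ===== Notes on version B (the rewrite author's own statement) =====
-- stated objective: alternative
-- what changed: Replaced the adjacency-dict + explicit-stack DFS from node 1 by a disjoint-set (union-find) structure: edges are merged with a smaller-root-wins union, then nodes sharing node 1's root are counted by a left-to-right root-table pass.
import Mathlib
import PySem

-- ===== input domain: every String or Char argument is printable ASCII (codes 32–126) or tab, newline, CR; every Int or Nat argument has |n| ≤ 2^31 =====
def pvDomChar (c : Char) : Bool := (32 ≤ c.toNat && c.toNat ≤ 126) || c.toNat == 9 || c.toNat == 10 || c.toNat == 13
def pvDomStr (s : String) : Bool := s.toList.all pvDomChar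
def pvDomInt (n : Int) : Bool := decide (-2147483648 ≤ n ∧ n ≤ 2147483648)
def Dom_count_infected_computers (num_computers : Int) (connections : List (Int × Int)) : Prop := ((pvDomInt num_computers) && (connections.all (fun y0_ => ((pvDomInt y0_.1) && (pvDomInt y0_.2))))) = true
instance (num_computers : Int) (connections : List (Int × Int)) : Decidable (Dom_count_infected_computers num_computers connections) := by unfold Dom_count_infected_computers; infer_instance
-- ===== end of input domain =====

-- B replaces A's adjacency-dict DFS by a union-find merge of the edges (alternative algorithm, no speed claim).

-- ===== PORT A =====
-- graph = {i: set() for i in range(1, num_computers+1)}; for a, b in connections: graph[a].add(b); graph[b].add(a)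
-- (Dict.modify: under Pre_ every endpoint is a key of the dict, so this is exactly Python's graph[k].add)
def buildGraph (num_computers : Int) (connections : List (Int × Int)) : PySem.Dict Int (PySem.Set Int) :=
  connections.foldl
    (fun d e =>
      (d.modify e.1 PySem.Set.empty (fun s => PySem.Set.add s e.2)).modify e.2
        PySem.Set.empty (fun s => PySem.Set.add s e.1))
    ((PySem.List.pyRange 1 (num_computers + 1) 1).foldl
      (fun d i => d.insert i PySem.Set.empty) PySem.Dict.empty)

-- the while loop, with a fuel parameter; dfsFuel below is proved sufficient (lemma dfs_main)
def dfsLoop (graph : PySem.Dict Int (PySem.Set Int)) :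
    Nat → List Int → PySem.Set Int → PySem.Set Int
  | 0, _, infected => infected
  | _ + 1, [], infected => infected
  | fuel + 1, h :: t, infected =>
      let cur := (h :: t).getLast (List.cons_ne_nil h t)       -- stack.pop()
      let rest := (h :: t).dropLast
      if cur ∈ infected then dfsLoop graph fuel rest infected
      else
        dfsLoop graph fuel
          (rest ++ PySem.Set.diff (graph.getD cur PySem.Set.empty) (PySem.Set.add infected cur))
          (PySem.Set.add infected cur)

def dfsFuel (connections : List (Int × Int)) : Nat :=
  (1 + 2 * connections.length) * (1 + 2 * connections.length + 1) + 2

def count_infected_computers (num_computers : Int) (connections : List (Int × Int)) : Int :=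
  ((dfsLoop (buildGraph num_computers connections) (dfsFuel connections) [1] PySem.Set.empty).length : Int) - 1

-- ===== PORT B =====
-- find(x): while parent[x] != x: x = parent[x].  With the smaller-root-wins union the
-- parent map always satisfies parent[i] ≤ i, so the chain from x is strictly decreasing
-- and x.toNat loop steps are provably enough fuel (lemmas below).
def ufFind (p : Int → Int) : Nat → Int → Int
  | 0, x => x
  | fuel + 1, x => if p x = x then x else ufFind p fuel (p x)

def ufRoot (p : Int → Int) (x : Int) : Int := ufFind p x.toNat x

-- one iteration of the union loop: ra, rb = find(a), find(b); link larger root below smaller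
def ufUnion (p : Int → Int) (e : Int × Int) : Int → Int :=
  let ra := ufRoot p e.1
  let rb := ufRoot p e.2
  if ra < rb then (fun j => if j = rb then ra else p j)
  else if rb < ra then (fun j => if j = ra then rb else p j)
  else p

-- parent = list(range(num_computers+1)) (modelled as a function, exact on the indices used);
-- then the union loop over connections
def ufParent (connections : List (Int × Int)) : Int → Int :=
  connections.foldl ufUnion (fun j => j)

-- roots[i] = i if parent[i] == i else roots[parent[i]]; if roots[i] == root: count += 1
def count_infected_computers_alt (num_computers : Int) (connections : List (Int × Int)) : Int :=
  let p := ufParent connections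
  let root := ufRoot p 1
  let res := (PySem.List.pyRange 1 (num_computers + 1) 1).foldl
    (fun (st : (Int → Int) × Int) i =>
      let r := if p i = i then i else st.1 (p i)
      ((fun j => if j = i then r else st.1 j), if r = root then st.2 + 1 else st.2))
    ((fun _ => (0 : Int)), 0)
  res.2 - 1

-- ===== PRECONDITION & SPEC =====
-- Pre_ excludes exactly the inputs where A raises KeyError: num_computers < 1 (node 1 absent
-- from the dict) or a connection endpoint outside 1..num_computers (missing dict key).
def Pre_count_infected_computers (num_computers : Int) (connections : List (Int × Int)) : Prop :=
  1 ≤ num_computers ∧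
    ∀ e ∈ connections, (1 ≤ e.1 ∧ e.1 ≤ num_computers) ∧ (1 ≤ e.2 ∧ e.2 ≤ num_computers)
instance (num_computers : Int) (connections : List (Int × Int)) : Decidable (Pre_count_infected_computers num_computers connections) := by unfold Pre_count_infected_computers; infer_instance

def pvWitness_count_infected_computers : Int × (List (Int × Int)) := (3, [(1, 2)])

def Spec_count_infected_computers (num_computers : Int) (connections : List (Int × Int)) (out : Int) : Prop := out = count_infected_computers_alt num_computers connections
instance (num_computers : Int) (connections : List (Int × Int)) (out : Int) : Decidable (Spec_count_infected_computers num_computers connections out) := by unfold Spec_count_infected_computers; infer_instance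

-- ===== CLAIM (what is proved, stated in full; the proofs are below) =====
def Claim_equal_count_infected_computers : Prop := ∀ (num_computers : Int) (connections : List (Int × Int)), Dom_count_infected_computers num_computers connections → Pre_count_infected_computers num_computers connections → Spec_count_infected_computers num_computers connections (count_infected_computers num_computers connections)

-- ===== LEMMAS AND PROOFS =====

-- the undirected edge relation of the connection list, and connectivity
def Edg (c : List (Int × Int)) (x y : Int) : Prop := (x, y) ∈ c ∨ (y, x) ∈ c
def Conn (c : List (Int × Int)) : Int → Int → Prop := Relation.ReflTransGen (Edg c)

lemma edg_symm {c : List (Int × Int)} {x y : Int} (h : Edg c x y) : Edg c y x := h.symm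

lemma conn_symm {c : List (Int × Int)} {x y : Int} (h : Conn c x y) : Conn c y x := by
  have hs : Symmetric (Edg c) := fun _ _ h => edg_symm h
  exact (Relation.ReflTransGen.symmetric hs) h

-- all vertices ever seen by A: node 1 and the edge endpoints
def pvV (c : List (Int × Int)) : List Int := (1 : Int) :: c.flatMap (fun e => [e.1, e.2])
def pvK (c : List (Int × Int)) : Nat := (pvV c).length
def pvM (c : List (Int × Int)) (stack : List Int) (inf : PySem.Set Int) : Nat :=
  (pvK c - inf.length) * (pvK c + 1) + stack.length

lemma pvK_eq (c : List (Int × Int)) : pvK c = 1 + 2 * c.length := by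
  have h : ∀ l : List (Int × Int), (l.flatMap (fun e => [e.1, e.2])).length = 2 * l.length := by
    intro l
    induction l with
    | nil => rfl
    | cons e t ih => simp [List.flatMap_cons, ih]; omega
  simp [pvK, pvV, h]; omega

lemma mem_pvV_of_edg {c : List (Int × Int)} {a b : Int} (h : Edg c a b) : b ∈ pvV c := by
  rcases h with h | h
  · exact List.mem_cons_of_mem _ (List.mem_flatMap.mpr ⟨(a, b), h, by simp⟩)
  · exact List.mem_cons_of_mem _ (List.mem_flatMap.mpr ⟨(b, a), h, by simp⟩)

lemma nodup_subset_length_le {l L : List Int} (hnd : l.Nodup) (hsub : ∀ x ∈ l, x ∈ L) :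
    l.length ≤ L.length := by
  calc l.length = l.toFinset.card := (List.toFinset_card_of_nodup hnd).symm
    _ ≤ L.toFinset.card := Finset.card_le_card
        (fun x hx => List.mem_toFinset.mpr (hsub x (List.mem_toFinset.mp hx)))
    _ ≤ L.length := L.toFinset_card_le

lemma conn_range {c : List (Int × Int)} {n : Int} (hn : 1 ≤ n)
    (hc : ∀ e ∈ c, (1 ≤ e.1 ∧ e.1 ≤ n) ∧ (1 ≤ e.2 ∧ e.2 ≤ n)) {x : Int}
    (h : Conn c 1 x) : 1 ≤ x ∧ x ≤ n := by
  induction h with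
  | refl => exact ⟨le_refl 1, hn⟩
  | tail hseg hedge ih =>
      rcases hedge with he | he
      · exact (hc _ he).2
      · exact (hc _ he).1

-- ---- graph construction ----
lemma buildGraph_mem (num_computers : Int) (c : List (Int × Int)) (a b : Int) :
    b ∈ (buildGraph num_computers c).getD a PySem.Set.empty ↔ Edg c a b := by
  have hinit : ∀ (l : List Int) (d : PySem.Dict Int (PySem.Set Int)),
      (∀ a : Int, d.getD a PySem.Set.empty = PySem.Set.empty) →
      ∀ a : Int, (l.foldl (fun d i => d.insert i PySem.Set.empty) d).getD a PySem.Set.empty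
        = PySem.Set.empty := by
    intro l
    induction l with
    | nil => intro d hd a; exact hd a
    | cons i t ih =>
        intro d hd a
        refine ih _ (fun a' => ?_) a
        rw [PySem.Dict.getD_insert]
        split_ifs with h
        · rfl
        · exact hd a'
  have haux : ∀ (l : List (Int × Int)) (d : PySem.Dict Int (PySem.Set Int)) (a b : Int),
      (∀ a' : Int, (d.getD a' PySem.Set.empty).Nodup) →
      (b ∈ (l.foldl
        (fun d e =>
          (d.modify e.1 PySem.Set.empty (fun s => PySem.Set.add s e.2)).modify e.2
            PySem.Set.empty (fun s => PySem.Set.add s e.1)) d).getD a PySem.Set.empty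
        ↔ b ∈ d.getD a PySem.Set.empty ∨ Edg l a b) := by
    intro l
    induction l with
    | nil => intro d a b hnd; simp [Edg]
    | cons e t ih =>
        intro d a b hnd
        obtain ⟨u, v⟩ := e
        rw [List.foldl_cons]
        rw [ih _ a b (by
          intro a'
          simp only [PySem.Dict.getD_modify]
          split_ifs <;>
            (try exact hnd _) <;>
            (try exact PySem.Set.nodup_add _ _ (hnd _)) <;>
            exact PySem.Set.nodup_add _ _ (PySem.Set.nodup_add _ _ (hnd _)))]
        simp only [PySem.Dict.getD_modify, Edg, List.mem_cons, Prod.mk.injEq]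
        by_cases huv : u = v
        · subst huv
          by_cases h : a = u <;> simp [h, PySem.Set.mem_add] <;> tauto
        · have hvu : ¬v = u := fun h => huv h.symm
          by_cases h2 : a = v <;> by_cases h1 : a = u
          · exact absurd (h1.symm.trans h2) huv
          · simp [h2, hvu, PySem.Set.mem_add] <;> tauto
          · simp [h1, huv, PySem.Set.mem_add] <;> tauto
          · simp [h2, h1]
  unfold buildGraph
  rw [haux _ _ a b (by intro a'; rw [hinit _ _ (fun a'' => PySem.Dict.getD_empty _ _) a']; exact List.nodup_nil)]
  rw [hinit _ _ (fun a'' => PySem.Dict.getD_empty _ _) a]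
  simp [PySem.Set.empty]

lemma buildGraph_nodup (num_computers : Int) (c : List (Int × Int)) (a : Int) :
    ((buildGraph num_computers c).getD a PySem.Set.empty).Nodup := by
  have hinit : ∀ (l : List Int) (d : PySem.Dict Int (PySem.Set Int)),
      (∀ a : Int, d.getD a PySem.Set.empty = PySem.Set.empty) →
      ∀ a : Int, (l.foldl (fun d i => d.insert i PySem.Set.empty) d).getD a PySem.Set.empty
        = PySem.Set.empty := by
    intro l
    induction l with
    | nil => intro d hd a; exact hd a
    | cons i t ih =>
        intro d hd a
        refine ih _ (fun a' => ?_) a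
        rw [PySem.Dict.getD_insert]
        split_ifs with h
        · rfl
        · exact hd a'
  have haux : ∀ (l : List (Int × Int)) (d : PySem.Dict Int (PySem.Set Int)) (a : Int),
      (∀ a' : Int, (d.getD a' PySem.Set.empty).Nodup) →
      ((l.foldl
        (fun d e =>
          (d.modify e.1 PySem.Set.empty (fun s => PySem.Set.add s e.2)).modify e.2
            PySem.Set.empty (fun s => PySem.Set.add s e.1)) d).getD a PySem.Set.empty).Nodup := by
    intro l
    induction l with
    | nil => intro d a hnd; exact hnd a
    | cons e t ih =>
        intro d a hnd
        rw [List.foldl_cons]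
        refine ih _ a (fun a' => ?_)
        simp only [PySem.Dict.getD_modify]
        split_ifs <;>
          (try exact hnd _) <;>
          (try exact PySem.Set.nodup_add _ _ (hnd _)) <;>
          exact PySem.Set.nodup_add _ _ (PySem.Set.nodup_add _ _ (hnd _))
  unfold buildGraph
  exact haux _ _ a (by
    intro a'
    rw [hinit _ _ (fun a'' => PySem.Dict.getD_empty _ _) a']
    exact List.nodup_nil)

-- ---- the DFS loop ----
lemma dfs_main (c : List (Int × Int)) (graph : PySem.Dict Int (PySem.Set Int))
    (HN : ∀ a b : Int, b ∈ graph.getD a PySem.Set.empty ↔ Edg c a b)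
    (HNd : ∀ a : Int, (graph.getD a PySem.Set.empty).Nodup) :
    ∀ (fuel : Nat) (stack : List Int) (inf : PySem.Set Int),
      inf.Nodup →
      (∀ x ∈ inf, x ∈ pvV c) →
      (∀ x ∈ stack, x ∈ pvV c) →
      (∀ a ∈ inf, ∀ b : Int, Edg c a b → b ∈ inf ∨ b ∈ stack) →
      pvM c stack inf < fuel →
      (dfsLoop graph fuel stack inf).Nodup ∧
      (∀ x ∈ inf, x ∈ dfsLoop graph fuel stack inf) ∧
      (∀ s ∈ stack, s ∈ dfsLoop graph fuel stack inf) ∧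
      (∀ a ∈ dfsLoop graph fuel stack inf, ∀ b : Int, Edg c a b → b ∈ dfsLoop graph fuel stack inf) ∧
      (∀ x ∈ dfsLoop graph fuel stack inf, x ∈ inf ∨ ∃ s ∈ stack, Conn c s x) := by
  have hends : ∀ a b : Int, Edg c a b → b ∈ c.flatMap (fun e => [e.1, e.2]) := by
    intro a b h
    rcases h with h | h
    · exact List.mem_flatMap.mpr ⟨(a, b), h, by simp⟩
    · exact List.mem_flatMap.mpr ⟨(b, a), h, by simp⟩
  have hK1 : 1 ≤ pvK c := by rw [pvK_eq]; omega
  have hKe : (c.flatMap fun e => [e.1, e.2]).length + 1 = pvK c := by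
    simp [pvK, pvV]
  intro fuel
  induction fuel with
  | zero => intro stack inf _ _ _ _ hM; exact absurd hM (Nat.not_lt_zero _)
  | succ fuel ih =>
      intro stack inf hnd hinfV hstackV hclose hM
      match stack with
      | [] =>
          refine ⟨hnd, fun x hx => hx, by simp, ?_, fun x hx => Or.inl hx⟩
          intro a ha b hb
          rcases hclose a ha b hb with h | h
          · exact h
          · cases h
      | h :: t =>
          have hne : (h :: t) ≠ [] := List.cons_ne_nil h t
          set cur := (h :: t).getLast hne with hcurdef
          set rest := (h :: t).dropLast with hrestdef
          have hsplit : rest ++ [cur] = h :: t := List.dropLast_append_getLast hne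
          have hmem_stack : ∀ x : Int, x ∈ (h :: t) ↔ x ∈ rest ∨ x = cur := by
            intro x; rw [← hsplit]; simp
          have hrestlen : rest.length + 1 = (h :: t).length := by
            rw [← hsplit]; simp
          by_cases hcur : cur ∈ inf
          · have hstep : dfsLoop graph (fuel + 1) (h :: t) inf = dfsLoop graph fuel rest inf := by
              simp only [dfsLoop]
              rw [if_pos hcur]
            rw [hstep]
            have hM' : pvM c rest inf < fuel := by
              unfold pvM at hM ⊢
              omega
            obtain ⟨N, I1, S1, C1, U1⟩ := ih rest inf hnd hinfV
              (fun x hx => hstackV x ((hmem_stack x).mpr (Or.inl hx)))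
              (fun a ha b hb => by
                rcases hclose a ha b hb with hbi | hbs
                · exact Or.inl hbi
                · rcases (hmem_stack b).mp hbs with hbr | hbc
                  · exact Or.inr hbr
                  · exact Or.inl (hbc ▸ hcur)) hM'
            refine ⟨N, I1, ?_, C1, ?_⟩
            · intro s hs
              rcases (hmem_stack s).mp hs with hsr | hsc
              · exact S1 s hsr
              · exact hsc ▸ I1 cur hcur
            · intro x hx
              rcases U1 x hx with hxi | ⟨s, hs, hconn⟩
              · exact Or.inl hxi
              · exact Or.inr ⟨s, (hmem_stack s).mpr (Or.inl hs), hconn⟩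
          · have hstep : dfsLoop graph (fuel + 1) (h :: t) inf =
                dfsLoop graph fuel
                  (rest ++ PySem.Set.diff (graph.getD cur PySem.Set.empty) (PySem.Set.add inf cur))
                  (PySem.Set.add inf cur) := by
              simp only [dfsLoop]
              rw [if_neg hcur]
            rw [hstep]
            have hcurV : cur ∈ pvV c := hstackV cur ((hmem_stack cur).mpr (Or.inr rfl))
            have hinf'eq : PySem.Set.add inf cur = inf ++ [cur] := PySem.Set.add_of_not_mem hcur
            have hmem_inf' : ∀ x : Int, x ∈ PySem.Set.add inf cur ↔ x ∈ inf ∨ x = cur := by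
              intro x; rw [hinf'eq]; simp
            have hnd' : (PySem.Set.add inf cur).Nodup := PySem.Set.nodup_add inf cur hnd
            have hinf'V : ∀ x ∈ PySem.Set.add inf cur, x ∈ pvV c := by
              intro x hx
              rcases (hmem_inf' x).mp hx with hxi | rfl
              · exact hinfV x hxi
              · exact hcurV
            have hmem_D : ∀ x : Int,
                x ∈ PySem.Set.diff (graph.getD cur PySem.Set.empty) (PySem.Set.add inf cur) ↔
                  Edg c cur x ∧ ¬x ∈ PySem.Set.add inf cur := by
              intro x
              rw [PySem.Set.mem_diff, HN]
            have hDnd : (PySem.Set.diff (graph.getD cur PySem.Set.empty) (PySem.Set.add inf cur)).Nodup :=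
              PySem.Set.nodup_diff _ _ (HNd cur)
            have hinf'len : (PySem.Set.add inf cur).length = inf.length + 1 := by
              rw [hinf'eq]; simp
            have hinfK : inf.length + 1 ≤ pvK c := by
              rw [← hinf'len]
              exact nodup_subset_length_le hnd' hinf'V
            have hDlen :
                (PySem.Set.diff (graph.getD cur PySem.Set.empty) (PySem.Set.add inf cur)).length + 1 ≤ pvK c := by
              have hDle : (PySem.Set.diff (graph.getD cur PySem.Set.empty) (PySem.Set.add inf cur)).length ≤
                  (c.flatMap fun e => [e.1, e.2]).length :=
                nodup_subset_length_le hDnd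
                  (fun x hx => hends cur x ((hmem_D x).mp hx).1)
              omega
            have hM' : pvM c
                (rest ++ PySem.Set.diff (graph.getD cur PySem.Set.empty) (PySem.Set.add inf cur))
                (PySem.Set.add inf cur) < fuel := by
              unfold pvM at hM ⊢
              rw [hinf'len, List.length_append]
              have hexp : pvK c - inf.length = (pvK c - (inf.length + 1)) + 1 := by omega
              rw [hexp, add_one_mul] at hM
              set P := (pvK c - (inf.length + 1)) * (pvK c + 1) with hP
              omega
            obtain ⟨N, I1, S1, C1, U1⟩ := ih _ _ hnd' hinf'V
              (by
                intro x hx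
                rcases List.mem_append.mp hx with hxr | hxD
                · exact hstackV x ((hmem_stack x).mpr (Or.inl hxr))
                · exact mem_pvV_of_edg ((hmem_D x).mp hxD).1)
              (by
                intro a ha b hb
                rcases (hmem_inf' a).mp ha with hai | rfl
                · rcases hclose a hai b hb with hbi | hbs
                  · exact Or.inl ((hmem_inf' b).mpr (Or.inl hbi))
                  · rcases (hmem_stack b).mp hbs with hbr | hbc
                    · exact Or.inr (List.mem_append.mpr (Or.inl hbr))
                    · exact Or.inl ((hmem_inf' b).mpr (Or.inr hbc))
                · by_cases hbin : b ∈ PySem.Set.add inf cur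
                  · exact Or.inl hbin
                  · exact Or.inr (List.mem_append.mpr (Or.inr ((hmem_D b).mpr ⟨hb, hbin⟩)))) hM'
            refine ⟨N, fun x hx => I1 x ((hmem_inf' x).mpr (Or.inl hx)), ?_, C1, ?_⟩
            · intro s hs
              rcases (hmem_stack s).mp hs with hsr | rfl
              · exact S1 s (List.mem_append.mpr (Or.inl hsr))
              · exact I1 cur ((hmem_inf' cur).mpr (Or.inr rfl))
            · intro x hx
              rcases U1 x hx with hxi | ⟨s, hs, hconn⟩
              · rcases (hmem_inf' x).mp hxi with hxii | rfl
                · exact Or.inl hxii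
                · exact Or.inr ⟨cur, (hmem_stack cur).mpr (Or.inr rfl), Relation.ReflTransGen.refl⟩
              · rcases List.mem_append.mp hs with hsr | hsD
                · exact Or.inr ⟨s, (hmem_stack s).mpr (Or.inl hsr), hconn⟩
                · exact Or.inr ⟨cur, (hmem_stack cur).mpr (Or.inr rfl),
                    Relation.ReflTransGen.trans
                      (Relation.ReflTransGen.single ((hmem_D s).mp hsD).1) hconn⟩

-- ---- union-find ----
def Inv1 (p : Int → Int) : Prop := ∀ x : Int, p x ≤ x ∧ (1 ≤ x → 1 ≤ p x)

lemma ufFind_of_root {p : Int → Int} {x : Int} (h : p x = x) (f : Nat) : ufFind p f x = x := by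
  induction f with
  | zero => rfl
  | succ f ih => simp [ufFind, h]

lemma ufRoot_of_root {p : Int → Int} {x : Int} (h : p x = x) : ufRoot p x = x :=
  ufFind_of_root h _

lemma ufFind_eq_ufRoot {p : Int → Int} (hp : Inv1 p) :
    ∀ (x : Int), 1 ≤ x → ∀ f : Nat, x.toNat ≤ f → ufFind p f x = ufRoot p x := by
  suffices h : ∀ n : Nat, ∀ x : Int, x.toNat ≤ n → 1 ≤ x → ∀ f : Nat, x.toNat ≤ f →
      ufFind p f x = ufRoot p x by
    intro x hx f hf; exact h x.toNat x le_rfl hx f hf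
  intro n
  induction n with
  | zero => intro x hxn hx; omega
  | succ n ih =>
      intro x hxn hx f hf
      by_cases hroot : p x = x
      · rw [ufFind_of_root hroot, ufRoot_of_root hroot]
      · have hpx1 : 1 ≤ p x := (hp x).2 hx
        have hpxlt : p x < x := lt_of_le_of_ne (hp x).1 hroot
        obtain ⟨k, hk⟩ : ∃ k, x.toNat = k + 1 := ⟨x.toNat - 1, by omega⟩
        obtain ⟨g, hg⟩ : ∃ g, f = g + 1 := ⟨f - 1, by omega⟩
        subst hg
        have h1 : ufFind p (g + 1) x = ufFind p g (p x) := by simp [ufFind, hroot]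
        have h2 : ufRoot p x = ufFind p k (p x) := by
          unfold ufRoot; rw [hk]; simp [ufFind, hroot]
        rw [h1, h2, ih (p x) (by omega) hpx1 g (by omega), ih (p x) (by omega) hpx1 k (by omega)]

lemma ufRoot_step {p : Int → Int} (hp : Inv1 p) {x : Int} (hx : 1 ≤ x) (h : p x ≠ x) :
    ufRoot p x = ufRoot p (p x) := by
  have hpx1 : 1 ≤ p x := (hp x).2 hx
  have hpxlt : p x < x := lt_of_le_of_ne (hp x).1 h
  obtain ⟨k, hk⟩ : ∃ k, x.toNat = k + 1 := ⟨x.toNat - 1, by omega⟩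
  have h2 : ufRoot p x = ufFind p k (p x) := by
    unfold ufRoot; rw [hk]; simp [ufFind, h]
  rw [h2, ufFind_eq_ufRoot hp (p x) hpx1 k (by omega)]

lemma ufRoot_isRoot {p : Int → Int} (hp : Inv1 p) :
    ∀ {x : Int}, 1 ≤ x → p (ufRoot p x) = ufRoot p x ∧ 1 ≤ ufRoot p x ∧ ufRoot p x ≤ x := by
  suffices h : ∀ n : Nat, ∀ x : Int, x.toNat ≤ n → 1 ≤ x →
      p (ufRoot p x) = ufRoot p x ∧ 1 ≤ ufRoot p x ∧ ufRoot p x ≤ x by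
    intro x hx; exact h x.toNat x le_rfl hx
  intro n
  induction n with
  | zero => intro x hxn hx; omega
  | succ n ih =>
      intro x hxn hx
      by_cases hroot : p x = x
      · rw [ufRoot_of_root hroot]; exact ⟨hroot, hx, le_refl x⟩
      · have hpx1 : 1 ≤ p x := (hp x).2 hx
        have hpxlt : p x < x := lt_of_le_of_ne (hp x).1 hroot
        rw [ufRoot_step hp hx hroot]
        obtain ⟨h1, h2, h3⟩ := ih (p x) (by omega) hpx1
        exact ⟨h1, h2, by omega⟩

lemma Inv1_update {p : Int → Int} (hp : Inv1 p) {R r : Int} (hrR : r < R) (h1r : 1 ≤ r) :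
    Inv1 (fun j => if j = R then r else p j) := by
  intro x
  constructor
  · by_cases h : x = R <;> simp [h] <;> [omega; exact (hp x).1]
  · intro hx; by_cases h : x = R <;> simp [h] <;> [omega; exact (hp x).2 hx]

-- roots after a single root-to-root link
lemma ufRoot_update {p : Int → Int} (hp : Inv1 p) {R r : Int}
    (hR : p R = R) (hr : p r = r) (hrR : r < R) (h1r : 1 ≤ r) :
    ∀ (x : Int), 1 ≤ x →
      ufRoot (fun j => if j = R then r else p j) x = if ufRoot p x = R then r else ufRoot p x := by
  have hInv' : Inv1 (fun j => if j = R then r else p j) := Inv1_update hp hrR h1r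
  suffices h : ∀ n : Nat, ∀ x : Int, x.toNat ≤ n → 1 ≤ x →
      ufRoot (fun j => if j = R then r else p j) x = if ufRoot p x = R then r else ufRoot p x by
    intro x hx; exact h x.toNat x le_rfl hx
  intro n
  induction n with
  | zero => intro x hxn hx; omega
  | succ n ih =>
      intro x hxn hx
      by_cases hxR : x = R
      · have hne : (fun j => if j = R then r else p j) x ≠ x := by simp [hxR]; omega
        rw [ufRoot_step hInv' hx hne]
        rw [if_pos hxR]
        have hrfix : (fun j => if j = R then r else p j) r = r := by
          simp [show r ≠ R from by omega, hr]
        rw [ufRoot_of_root hrfix, hxR, ufRoot_of_root hR, if_pos rfl]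
      · by_cases hroot : p x = x
        · have h1 : (fun j => if j = R then r else p j) x = x := by simp [hxR, hroot]
          rw [ufRoot_of_root h1, ufRoot_of_root hroot, if_neg hxR]
        · have hpx1 : 1 ≤ p x := (hp x).2 hx
          have hpxlt : p x < x := lt_of_le_of_ne (hp x).1 hroot
          have hne2 : (fun j => if j = R then r else p j) x ≠ x := by
            simp only [if_neg hxR]; exact hroot
          rw [ufRoot_step hInv' hx hne2]
          simp only [if_neg hxR]
          rw [ufRoot_step hp hx hroot]
          exact ih (p x) (by omega) hpx1

lemma Inv1_ufUnion {p : Int → Int} (hp : Inv1 p) {e : Int × Int}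
    (h1 : 1 ≤ e.1) (h2 : 1 ≤ e.2) : Inv1 (ufUnion p e) := by
  obtain ⟨hra, hra1, -⟩ := ufRoot_isRoot hp h1
  obtain ⟨hrb, hrb1, -⟩ := ufRoot_isRoot hp h2
  unfold ufUnion
  simp only []
  split_ifs with hab hba
  · exact Inv1_update hp hab hra1
  · exact Inv1_update hp hba hrb1
  · exact hp

lemma ufRoot_ufUnion {p : Int → Int} (hp : Inv1 p) {e : Int × Int}
    (h1 : 1 ≤ e.1) (h2 : 1 ≤ e.2) {x : Int} (hx : 1 ≤ x) :
    ufRoot (ufUnion p e) x =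
      if ufRoot p e.1 < ufRoot p e.2 then
        (if ufRoot p x = ufRoot p e.2 then ufRoot p e.1 else ufRoot p x)
      else if ufRoot p e.2 < ufRoot p e.1 then
        (if ufRoot p x = ufRoot p e.1 then ufRoot p e.2 else ufRoot p x)
      else ufRoot p x := by
  obtain ⟨hra, hra1, -⟩ := ufRoot_isRoot hp h1
  obtain ⟨hrb, hrb1, -⟩ := ufRoot_isRoot hp h2
  unfold ufUnion
  simp only []
  by_cases hab : ufRoot p e.1 < ufRoot p e.2
  · simp only [if_pos hab]
    exact ufRoot_update hp hrb hra hab hra1 x hx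
  · simp only [if_neg hab]
    by_cases hba : ufRoot p e.2 < ufRoot p e.1
    · simp only [if_pos hba]
      exact ufRoot_update hp hra hrb hba hrb1 x hx
    · simp only [if_neg hba]

lemma ufUnion_joins {p : Int → Int} (hp : Inv1 p) {e : Int × Int}
    (h1 : 1 ≤ e.1) (h2 : 1 ≤ e.2) :
    ufRoot (ufUnion p e) e.1 = ufRoot (ufUnion p e) e.2 := by
  rw [ufRoot_ufUnion hp h1 h2 h1, ufRoot_ufUnion hp h1 h2 h2]
  rcases lt_trichotomy (ufRoot p e.1) (ufRoot p e.2) with h | h | h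
  · simp [h, ne_of_lt h]
  · simp [h]
  · simp [h, ne_of_lt h, lt_asymm h]

lemma ufUnion_preserves_eq {p : Int → Int} (hp : Inv1 p) {e : Int × Int}
    (h1 : 1 ≤ e.1) (h2 : 1 ≤ e.2) {x y : Int} (hx : 1 ≤ x) (hy : 1 ≤ y)
    (h : ufRoot p x = ufRoot p y) :
    ufRoot (ufUnion p e) x = ufRoot (ufUnion p e) y := by
  rw [ufRoot_ufUnion hp h1 h2 hx, ufRoot_ufUnion hp h1 h2 hy, h]

-- fold versions
lemma Inv1_foldl {l : List (Int × Int)} (hl : ∀ e ∈ l, 1 ≤ e.1 ∧ 1 ≤ e.2) :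
    ∀ {p : Int → Int}, Inv1 p → Inv1 (l.foldl ufUnion p) := by
  induction l with
  | nil => intro p hp; exact hp
  | cons e t ih =>
      intro p hp
      exact ih (fun e' he' => hl e' (List.mem_cons_of_mem _ he'))
        (Inv1_ufUnion hp (hl e (List.mem_cons_self)).1 (hl e (List.mem_cons_self)).2)

lemma foldl_preserves_eq {l : List (Int × Int)} (hl : ∀ e ∈ l, 1 ≤ e.1 ∧ 1 ≤ e.2)
    {p : Int → Int} (hp : Inv1 p) {x y : Int} (hx : 1 ≤ x) (hy : 1 ≤ y)
    (h : ufRoot p x = ufRoot p y) :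
    ufRoot (l.foldl ufUnion p) x = ufRoot (l.foldl ufUnion p) y := by
  induction l generalizing p with
  | nil => exact h
  | cons e t ih =>
      have he := hl e List.mem_cons_self
      exact ih (fun e' he' => hl e' (List.mem_cons_of_mem _ he'))
        (Inv1_ufUnion hp he.1 he.2)
        (ufUnion_preserves_eq hp he.1 he.2 hx hy h)

lemma foldl_joins {l : List (Int × Int)} (hl : ∀ e ∈ l, 1 ≤ e.1 ∧ 1 ≤ e.2)
    {p : Int → Int} (hp : Inv1 p) :
    ∀ e ∈ l, ufRoot (l.foldl ufUnion p) e.1 = ufRoot (l.foldl ufUnion p) e.2 := by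
  induction l generalizing p with
  | nil => intro e he; cases he
  | cons e t ih =>
      intro e' he'
      have he := hl e List.mem_cons_self
      have htl : ∀ e'' ∈ t, 1 ≤ e''.1 ∧ 1 ≤ e''.2 :=
        fun e'' he'' => hl e'' (List.mem_cons_of_mem _ he'')
      rcases List.mem_cons.mp he' with rfl | hmem
      · exact foldl_preserves_eq htl (Inv1_ufUnion hp he.1 he.2) he.1 he.2
          (ufUnion_joins hp he.1 he.2)
      · exact ih htl (Inv1_ufUnion hp he.1 he.2) e' hmem

-- p never disconnects: every parent is connected to its child
def Inv2 (c : List (Int × Int)) (p : Int → Int) : Prop := ∀ x : Int, 1 ≤ x → Conn c x (p x)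

lemma conn_ufRoot {c : List (Int × Int)} {p : Int → Int} (hp : Inv1 p) (h2 : Inv2 c p) :
    ∀ {x : Int}, 1 ≤ x → Conn c x (ufRoot p x) := by
  suffices h : ∀ n : Nat, ∀ x : Int, x.toNat ≤ n → 1 ≤ x → Conn c x (ufRoot p x) by
    intro x hx; exact h x.toNat x le_rfl hx
  intro n
  induction n with
  | zero => intro x hxn hx; omega
  | succ n ih =>
      intro x hxn hx
      by_cases hroot : p x = x
      · rw [ufRoot_of_root hroot]; exact Relation.ReflTransGen.refl
      · have hpx1 : 1 ≤ p x := (hp x).2 hx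
        have hpxlt : p x < x := lt_of_le_of_ne (hp x).1 hroot
        rw [ufRoot_step hp hx hroot]
        exact Relation.ReflTransGen.trans (h2 x hx) (ih (p x) (by omega) hpx1)

lemma Inv2_ufUnion {c : List (Int × Int)} {p : Int → Int} (hp : Inv1 p) (h2 : Inv2 c p)
    {e : Int × Int} (hec : e ∈ c) (he1 : 1 ≤ e.1) (he2 : 1 ≤ e.2) : Inv2 c (ufUnion p e) := by
  have ca : Conn c e.1 (ufRoot p e.1) := conn_ufRoot hp h2 he1
  have cb : Conn c e.2 (ufRoot p e.2) := conn_ufRoot hp h2 he2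
  have cab : Conn c e.1 e.2 := Relation.ReflTransGen.single (Or.inl (by simpa using hec))
  intro x hx
  unfold ufUnion
  split_ifs with hab hba
  · by_cases hxr : x = ufRoot p e.2
    · simp only [if_pos hxr]
      rw [hxr]
      exact Relation.ReflTransGen.trans (conn_symm cb)
        (Relation.ReflTransGen.trans (conn_symm cab) ca)
    · simp only [if_neg hxr]; exact h2 x hx
  · by_cases hxr : x = ufRoot p e.1
    · simp only [if_pos hxr]
      rw [hxr]
      exact Relation.ReflTransGen.trans (conn_symm ca)
        (Relation.ReflTransGen.trans cab cb)
    · simp only [if_neg hxr]; exact h2 x hx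
  · exact h2 x hx

lemma Inv2_foldl {c : List (Int × Int)} {l : List (Int × Int)}
    (hl : ∀ e ∈ l, e ∈ c ∧ 1 ≤ e.1 ∧ 1 ≤ e.2) :
    ∀ {p : Int → Int}, Inv1 p → Inv2 c p → Inv2 c (l.foldl ufUnion p) := by
  induction l with
  | nil => intro p hp h2; exact h2
  | cons e t ih =>
      intro p hp h2
      have he := hl e List.mem_cons_self
      exact ih (fun e' he' => hl e' (List.mem_cons_of_mem _ he'))
        (Inv1_ufUnion hp he.2.1 he.2.2) (Inv2_ufUnion hp h2 he.1 he.2.1 he.2.2)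

-- roots of the final parent map characterise connectivity to node 1
lemma B_char {c : List (Int × Int)} (hc : ∀ e ∈ c, 1 ≤ e.1 ∧ 1 ≤ e.2) {i : Int} (hi : 1 ≤ i) :
    (ufRoot (ufParent c) i = ufRoot (ufParent c) 1 ↔ Conn c 1 i) := by
  have hid : Inv1 (fun j : Int => j) := fun x => ⟨le_refl x, fun h => h⟩
  have hInv : Inv1 (ufParent c) := Inv1_foldl hc hid
  constructor
  · intro h
    have hInv2 : Inv2 c (ufParent c) :=
      Inv2_foldl (fun e he => ⟨he, hc e he⟩) hid (fun x _ => Relation.ReflTransGen.refl)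
    have c1 : Conn c i (ufRoot (ufParent c) i) := conn_ufRoot hInv hInv2 hi
    have c2 : Conn c 1 (ufRoot (ufParent c) 1) := conn_ufRoot hInv hInv2 le_rfl
    exact Relation.ReflTransGen.trans c2 (conn_symm (h ▸ c1))
  · intro h
    clear hi
    induction h with
    | refl => rfl
    | tail hseg hedge ih =>
        rcases hedge with he | he
        · exact (foldl_joins hc hid _ he).symm.trans ih
        · exact (foldl_joins hc hid _ he).trans ih

-- the counting loop adds 1 exactly for the i in range with root i = root
lemma count_loop (p : Int → Int) (root : Int) (hp : Inv1 p) :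
    ∀ (b a : Int), 1 ≤ a → ∀ (rm : Int → Int) (cnt : Int),
      (∀ j : Int, 1 ≤ j → j < a → rm j = ufRoot p j) →
      ((PySem.List.pyRange a b 1).foldl
        (fun (st : (Int → Int) × Int) i =>
          let r := if p i = i then i else st.1 (p i)
          ((fun j => if j = i then r else st.1 j), if r = root then st.2 + 1 else st.2))
        (rm, cnt)).2
        = cnt + ((PySem.List.pyRange a b 1).countP (fun i => ufRoot p i == root) : Int) := by
  intro b
  suffices h : ∀ n : Nat, ∀ a : Int, (b - a).toNat ≤ n → 1 ≤ a →
      ∀ (rm : Int → Int) (cnt : Int), (∀ j : Int, 1 ≤ j → j < a → rm j = ufRoot p j) →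
      ((PySem.List.pyRange a b 1).foldl
        (fun (st : (Int → Int) × Int) i =>
          let r := if p i = i then i else st.1 (p i)
          ((fun j => if j = i then r else st.1 j), if r = root then st.2 + 1 else st.2))
        (rm, cnt)).2
        = cnt + ((PySem.List.pyRange a b 1).countP (fun i => ufRoot p i == root) : Int) by
    intro a ha rm cnt hrm; exact h (b - a).toNat a le_rfl ha rm cnt hrm
  intro n
  induction n with
  | zero =>
      intro a hba ha rm cnt hrm
      rw [PySem.List.pyRange_one_eq_nil (by omega)]
      simp
  | succ n ih =>
      intro a hba ha rm cnt hrm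
      by_cases hab : a < b
      · rw [PySem.List.pyRange_one_cons hab]
        simp only [List.foldl_cons, List.countP_cons]
        have hra : (if p a = a then a else rm (p a)) = ufRoot p a := by
          by_cases hroot : p a = a
          · rw [if_pos hroot, ufRoot_of_root hroot]
          · have hpa1 : 1 ≤ p a := (hp a).2 ha
            have hlt : p a < a := lt_of_le_of_ne (hp a).1 hroot
            rw [if_neg hroot, hrm (p a) hpa1 hlt, ufRoot_step hp ha hroot]
        rw [ih (a + 1) (by omega) (by omega) _ _
          (by
            intro j hj hja
            by_cases hja' : j = a
            · simp only [hja']; exact hra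
            · simp only [if_neg hja']; exact hrm j hj (by omega))]
        by_cases heq : ufRoot p a = root
        · simp [hra, heq]; ring
        · simp [hra, heq]
      · rw [PySem.List.pyRange_one_eq_nil (by omega)]
        simp

-- ===== VERDICT (by name: the statement is the Claim_ definition above) =====
theorem count_infected_computers_spec : Claim_equal_count_infected_computers := by
  intro n c hdom hpre
  obtain ⟨hn, hc⟩ := hpre
  unfold Spec_count_infected_computers
  have HN := buildGraph_mem n c
  have HNd := buildGraph_nodup n c
  have hbound : ∀ e ∈ c, 1 ≤ e.1 ∧ 1 ≤ e.2 := fun e he => ⟨(hc e he).1.1, (hc e he).2.1⟩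
  -- ---- A's value: the DFS computes the connected component of 1 ----
  have hMtop : pvM c [1] PySem.Set.empty < dfsFuel c := by
    have h0 : pvM c [1] PySem.Set.empty = pvK c * (pvK c + 1) + 1 := by
      unfold pvM
      simp [PySem.Set.empty]
    rw [h0, pvK_eq]
    unfold dfsFuel
    set P := (1 + 2 * c.length) * (1 + 2 * c.length + 1) with hP
    omega
  obtain ⟨N, I1, S1, C1, U1⟩ := dfs_main c _ HN HNd (dfsFuel c) [1] PySem.Set.empty
    List.nodup_nil (fun x hx => absurd hx (List.not_mem_nil))
    (fun x hx => by
      have hx1 : x = 1 := by simpa using hx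
      exact hx1 ▸ List.mem_cons_self)
    (fun a ha => absurd ha (List.not_mem_nil)) hMtop
  have hSmem : ∀ x : Int, x ∈ dfsLoop (buildGraph n c) (dfsFuel c) [1] PySem.Set.empty ↔ Conn c 1 x := by
    intro x
    constructor
    · intro hx
      rcases U1 x hx with hxi | ⟨s, hs, hconn⟩
      · exact absurd hxi (List.not_mem_nil)
      · have hs1 : s = 1 := by simpa using hs
        exact hs1 ▸ hconn
    · intro hconn
      induction hconn with
      | refl => exact S1 1 (by simp)
      | tail hseg hedge ihh => exact C1 _ ihh _ hedge
  -- ---- B's value: union-find roots count the same component ----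
  have hid : Inv1 (fun j : Int => j) := fun x => ⟨le_refl x, fun h => h⟩
  have hInv1 : Inv1 (ufParent c) := Inv1_foldl hbound hid
  have hfold := count_loop (ufParent c) (ufRoot (ufParent c) 1) hInv1 (n + 1) 1 le_rfl
    (fun _ => (0 : Int)) 0 (fun j hj hlt => absurd hlt (by omega))
  have hBval : count_infected_computers_alt n c
      = (((PySem.List.pyRange 1 (n + 1) 1).filter
          (fun i => ufRoot (ufParent c) i == ufRoot (ufParent c) 1)).length : Int) - 1 := by
    unfold count_infected_computers_alt
    simp only []
    rw [hfold, List.countP_eq_length_filter]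
    omega
  have hFmem : ∀ i : Int,
      i ∈ (PySem.List.pyRange 1 (n + 1) 1).filter
        (fun i => ufRoot (ufParent c) i == ufRoot (ufParent c) 1) ↔ Conn c 1 i := by
    intro i
    rw [List.mem_filter, PySem.List.mem_pyRange_one]
    constructor
    · rintro ⟨⟨h1i, h2i⟩, hbeq⟩
      exact (B_char hbound h1i).mp (by simpa using hbeq)
    · intro hconn
      obtain ⟨hi1, hin⟩ := conn_range hn hc hconn
      exact ⟨⟨hi1, by omega⟩, by simpa using (B_char hbound hi1).mpr hconn⟩
  have hFnd : ((PySem.List.pyRange 1 (n + 1) 1).filter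
      (fun i => ufRoot (ufParent c) i == ufRoot (ufParent c) 1)).Nodup :=
    List.Nodup.filter _ (PySem.List.nodup_pyRange_one 1 (n + 1))
  have hperm := (List.perm_ext_iff_of_nodup N hFnd).mpr
    (fun x => (hSmem x).trans (hFmem x).symm)
  have hlen := hperm.length_eq
  show ((dfsLoop (buildGraph n c) (dfsFuel c) [1] PySem.Set.empty).length : Int) - 1
      = count_infected_computers_alt n c
  rw [hBval, hlen]
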